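-- pv_equiv track=rewrite | github.com/zekrowm/planning_python_public | bus_bay_management/bus_bay_assignment_ilp.py | evaluate_conflicts_per_route
-- ===== SOURCE A (Python) =====
-- from collections import defaultdict
--
-- def evaluate_conflicts_per_route(route_to_minutes, assignments):
--     """
--     From the ROUTE perspective, count conflicts for each route.
--
--     If route R is in bay B at minute M, and at least one other route is also
--     in B at minute M, then route R is in conflict for that minute.
--
--     Parameters
--     ----------
--     route_to_minutes : dict
--         {route_short_name: set_of_active_minutes}
--     assignments : dict
--         {route_short_name: bay_label}
--
--     Returns
--     -------
--     dict
--         {route_short_name: conflict_minutes}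
--     """
--     # Build bay->minute->list-of-routes
--     bay_to_minute_routes = defaultdict(lambda: defaultdict(list))
--     for route_id, bay_assigned in assignments.items():
--         for minute in route_to_minutes[route_id]:
--             bay_to_minute_routes[bay_assigned][minute].append(route_id)
--
--     # For each route, count how many of its active minutes are in conflict
--     route_conflicts = defaultdict(int)
--     for route_id, bay_assigned in assignments.items():
--         for minute in route_to_minutes[route_id]:
--             overlap = bay_to_minute_routes[bay_assigned][minute]
--             if len(overlap) > 1:
--                 route_conflicts[route_id] += 1
--     return dict(route_conflicts)
-- ===== SOURCE B (Python) =====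
-- def evaluate_conflicts_per_route(route_to_minutes, assignments):
--     # Pairwise view, partitioned by bay: a minute of route R conflicts exactly
--     # when some OTHER route assigned to the same bay is active at that minute.
--     # No per-(bay, minute) occupancy table is built.
--     bay_routes = {}
--     for route_id, bay in assignments.items():
--         bay_routes.setdefault(bay, []).append(route_id)
--     conflicts = {}
--     for route_id, bay in assignments.items():
--         others = set()
--         for other_id in bay_routes[bay]:
--             if other_id != route_id:
--                 others.update(route_to_minutes[other_id])
--         n = sum(1 for minute in route_to_minutes[route_id] if minute in others)
--         if n:
--             conflicts[route_id] = n
--     return conflicts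
-- ===== Notes on version B (the rewrite author's own statement) =====
-- stated objective: alternative
-- what changed: B never builds A's per-(bay,minute) occupancy structure: it groups routes by bay, and for each route forms the set union of the OTHER same-bay routes' minutes, counting a route's minutes that fall in that union (a pairwise set-intersection formulation instead of occupancy counting).
-- outside the precondition, e.g. on evaluate_conflicts_per_route({'A': [1, 1]}, {'A': 'b1'}): A returns {'A': 2}, B returns {}
import Mathlib
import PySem

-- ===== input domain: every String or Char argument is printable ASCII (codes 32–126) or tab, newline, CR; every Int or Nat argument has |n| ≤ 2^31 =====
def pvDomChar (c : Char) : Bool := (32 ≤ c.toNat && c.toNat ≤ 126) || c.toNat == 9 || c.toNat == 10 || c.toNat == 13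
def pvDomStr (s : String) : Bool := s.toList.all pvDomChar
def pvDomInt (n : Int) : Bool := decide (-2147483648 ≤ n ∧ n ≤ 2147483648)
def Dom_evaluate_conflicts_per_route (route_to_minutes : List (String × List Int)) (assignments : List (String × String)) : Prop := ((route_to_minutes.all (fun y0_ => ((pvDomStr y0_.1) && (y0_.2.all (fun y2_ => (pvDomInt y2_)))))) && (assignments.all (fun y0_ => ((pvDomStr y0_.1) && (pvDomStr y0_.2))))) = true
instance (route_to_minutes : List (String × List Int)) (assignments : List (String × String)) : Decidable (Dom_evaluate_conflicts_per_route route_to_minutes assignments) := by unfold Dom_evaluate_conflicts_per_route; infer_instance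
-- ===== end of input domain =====

-- B drops A's per-(bay,minute) occupancy structure: it groups routes by bay and counts,
-- for each route, its minutes lying in the union of the OTHER same-bay routes' minute
-- sets (a pairwise set-intersection formulation; alternative, same order of cost).


-- ===== PORT A =====
-- Literal port of A.  `route_to_minutes[route_id]` is ported as `getD _ []`, exact under
-- Pre_ (the KeyError inputs are excluded there).  The defaultdict autovivification on the
-- read `bay_to_minute_routes[bay][minute]` in the second loop has no effect on the returned
-- value (every key read there was inserted by the first loop), so the read is `getD`.
def evaluate_conflicts_per_route (route_to_minutes : List (String × List Int)) (assignments : List (String × String)) : List (String × Int) :=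
  let rtm : PySem.Dict String (List Int) := PySem.Dict.ofList route_to_minutes
  let items : List (String × String) := (PySem.Dict.ofList assignments).items
  -- bay_to_minute_routes = defaultdict(lambda: defaultdict(list)); nested append loop
  let bay_to_minute_routes : PySem.Dict String (PySem.Dict Int (List String)) :=
    items.foldl (fun d p =>
      (rtm.getD p.1 []).foldl (fun d minute =>
        d.modify p.2 PySem.Dict.empty (fun inner => inner.modify minute [] (· ++ [p.1]))) d)
      PySem.Dict.empty
  -- route_conflicts = defaultdict(int); increment per conflicting minute
  let route_conflicts : PySem.Dict String Int :=
    items.foldl (fun rc p =>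
      (rtm.getD p.1 []).foldl (fun rc minute =>
        if 1 < ((bay_to_minute_routes.getD p.2 PySem.Dict.empty).getD minute []).length
        then rc.modify p.1 0 (· + 1) else rc) rc)
      PySem.Dict.empty
  route_conflicts.items

-- ===== PORT B =====
-- Literal port of Source B: bay -> list of its routes, then per route the set union of the
-- other same-bay routes' minutes and a membership count.
def evaluate_conflicts_per_route_alt (route_to_minutes : List (String × List Int)) (assignments : List (String × String)) : List (String × Int) :=
  let rtm : PySem.Dict String (List Int) := PySem.Dict.ofList route_to_minutes
  let items : List (String × String) := (PySem.Dict.ofList assignments).items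
  -- bay_routes.setdefault(bay, []).append(route_id)
  let bay_routes : PySem.Dict String (List String) :=
    items.foldl (fun d p => d.modify p.2 [] (· ++ [p.1])) PySem.Dict.empty
  let conflicts : PySem.Dict String Int :=
    items.foldl (fun out p =>
      let others : PySem.Set Int :=
        (bay_routes.getD p.2 []).foldl (fun s other =>
          if other ≠ p.1 then PySem.Set.update s (rtm.getD other []) else s) PySem.Set.empty
      let n : Int := ((rtm.getD p.1 []).countP (fun m => PySem.Set.contains others m) : Nat)
      if n ≠ 0 then out.insert p.1 n else out)
      PySem.Dict.empty
  conflicts.items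

-- ===== PRECONDITION & SPEC =====
-- First conjunct excludes exactly the inputs where A raises KeyError (an assigned route
-- missing from route_to_minutes).  Second conjunct is the representation invariant of the
-- Python argument type dict[str, set[int]]: each minutes list holds distinct elements
-- (a list with duplicates does not represent a set).
def Pre_evaluate_conflicts_per_route (route_to_minutes : List (String × List Int)) (assignments : List (String × String)) : Prop :=
  (∀ p ∈ assignments, (PySem.Dict.ofList route_to_minutes).contains p.1 = true)
  ∧ (∀ q ∈ route_to_minutes, q.2.Nodup)
instance (route_to_minutes : List (String × List Int)) (assignments : List (String × String)) : Decidable (Pre_evaluate_conflicts_per_route route_to_minutes assignments) := by unfold Pre_evaluate_conflicts_per_route; infer_instance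
def pvWitness_evaluate_conflicts_per_route : (List (String × List Int)) × (List (String × String)) :=
  ([("A", [1, 2]), ("B", [2, 3])], [("A", "b1"), ("B", "b1")])
def Spec_evaluate_conflicts_per_route (route_to_minutes : List (String × List Int)) (assignments : List (String × String)) (out : List (String × Int)) : Prop := out = evaluate_conflicts_per_route_alt route_to_minutes assignments
instance (route_to_minutes : List (String × List Int)) (assignments : List (String × String)) (out : List (String × Int)) : Decidable (Spec_evaluate_conflicts_per_route route_to_minutes assignments out) := by unfold Spec_evaluate_conflicts_per_route; infer_instance

-- ===== CLAIM (what is proved, stated in full; the proofs are below) =====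
def Claim_equal_evaluate_conflicts_per_route : Prop := ∀ (route_to_minutes : List (String × List Int)) (assignments : List (String × String)), Dom_evaluate_conflicts_per_route route_to_minutes assignments → Pre_evaluate_conflicts_per_route route_to_minutes assignments → Spec_evaluate_conflicts_per_route route_to_minutes assignments (evaluate_conflicts_per_route route_to_minutes assignments)

-- ===== LEMMAS AND PROOFS =====

-- Phase 1, inner loop over one route's minutes: its effect on one (bay, minute) slot
-- of A's nested dict.
lemma inner1 (r : String) (bay b : String) (m : Int) :
    ∀ (ms : List Int) (d : PySem.Dict String (PySem.Dict Int (List String))),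
      (((ms.foldl (fun d minute =>
          d.modify bay PySem.Dict.empty (fun inner => inner.modify minute [] (· ++ [r]))) d).getD b PySem.Dict.empty).getD m []).length
        = ((d.getD b PySem.Dict.empty).getD m []).length + (if bay = b then ms.count m else 0) := by
  intro ms
  induction ms with
  | nil => intro d; simp
  | cons m' ms ih =>
    intro d
    rw [List.foldl_cons, ih]
    rw [PySem.Dict.getD_modify]
    by_cases hb : b = bay
    · subst hb
      rw [if_pos rfl, PySem.Dict.getD_modify, if_pos rfl]
      by_cases hm : m = m'
      · subst hm
        simp
        omega
      · rw [if_neg hm]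
        simp [Ne.symm hm]
    · rw [if_neg hb]
      have : bay ≠ b := fun h => hb h.symm
      simp [this]

lemma count_map_pair (bay b : String) (m : Int) (l : List Int) :
    (l.map (fun minute => (bay, minute))).count (b, m)
      = if bay = b then l.count m else 0 := by
  by_cases h : bay = b
  · subst h
    rw [if_pos rfl]
    exact List.count_map_of_injective _ _ (fun x y hxy => ((Prod.mk.injEq _ _ _ _).mp hxy).2) m
  · rw [if_neg h, List.count_eq_zero]
    intro hx
    rcases List.mem_map.mp hx with ⟨x, _, hx2⟩
    exact h (congrArg Prod.fst hx2)

-- Phase 1: the length of A's nested overlap list at (b, m) equals the multiplicity of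
-- (b, m) in the stream of (bay, minute) pairs of all assigned routes.
lemma phase1 (rtm : PySem.Dict String (List Int)) (b : String) (m : Int) :
    ∀ (its : List (String × String)) (d : PySem.Dict String (PySem.Dict Int (List String))),
      (((its.foldl (fun d p =>
          (rtm.getD p.1 []).foldl (fun d minute =>
            d.modify p.2 PySem.Dict.empty (fun inner => inner.modify minute [] (· ++ [p.1]))) d) d).getD b PySem.Dict.empty).getD m []).length
        = ((d.getD b PySem.Dict.empty).getD m []).length
          + (its.flatMap (fun p => (rtm.getD p.1 []).map (fun minute => (p.2, minute)))).count (b, m) := by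
  intro its
  induction its with
  | nil => intro d; simp
  | cons p its ih =>
    intro d
    rw [List.foldl_cons, ih, inner1]
    rw [List.flatMap_cons, List.count_append, count_map_pair]
    omega

-- The multiplicity of (b, m) in that stream, as a sum over the assignment items.
lemma count_stream (rtm : PySem.Dict String (List Int)) (b : String) (m : Int) :
    ∀ (its : List (String × String)),
      (its.flatMap (fun p => (rtm.getD p.1 []).map (fun minute => (p.2, minute)))).count (b, m)
        = (its.map (fun q => if q.2 = b then (rtm.getD q.1 []).count m else 0)).sum := by
  intro its
  induction its with
  | nil => simp
  | cons q its ih =>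
    rw [List.flatMap_cons, List.count_append, List.map_cons, List.sum_cons, ih, count_map_pair]

-- Every item of a dict built from a pair list is one of those pairs.
lemma mem_items_foldl_insert {ν : Type} :
    ∀ (l : List (String × ν)) (d : PySem.Dict String ν) (p : String × ν),
      p ∈ (l.foldl (fun d q => d.insert q.1 q.2) d).items → p ∈ d.items ∨ p ∈ l := by
  intro l
  induction l with
  | nil => intro d p h; exact Or.inl h
  | cons q l ih =>
    intro d p h
    rw [List.foldl_cons] at h
    rcases ih _ p h with h' | h'
    · rcases (PySem.Dict.mem_items_insert _ _ _ _).mp h' with h'' | h''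
      · exact Or.inr (h'' ▸ List.mem_cons_self)
      · exact Or.inl h''.1
    · exact Or.inr (List.mem_cons_of_mem _ h')

lemma mem_items_ofList {ν : Type} (l : List (String × ν)) (p : String × ν)
    (h : p ∈ (PySem.Dict.ofList l).items) : p ∈ l := by
  rcases mem_items_foldl_insert l PySem.Dict.empty p h with h' | h'
  · simp [PySem.Dict.empty] at h'
  · exact h'

-- B's grouping dict: the route list of bay b is the assigned routes filtered to bay b.
lemma group_getD (its : List (String × String)) (b : String) :
    (its.foldl (fun d p => d.modify p.2 [] (· ++ [p.1])) PySem.Dict.empty).getD b []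
      = (its.filter (fun p => p.2 == b)).map Prod.fst := by
  have h1 : its.foldl (fun d p => d.modify p.2 [] (· ++ [p.1])) PySem.Dict.empty
      = (its.map (fun p => (p.2, p.1))).foldl (fun d q => d.modify q.1 [] (· ++ [q.2])) PySem.Dict.empty := by
    rw [List.foldl_map]
  rw [h1, PySem.Dict.getD_foldl_modify_append]
  simp [List.filter_map, Function.comp_def]

-- Membership in B's union-of-others set.
lemma mem_others (rtm : PySem.Dict String (List Int)) (r : String) (m : Int) :
    ∀ (l : List String) (s : PySem.Set Int),
      m ∈ l.foldl (fun s other => if other ≠ r then PySem.Set.update s (rtm.getD other []) else s) s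
        ↔ m ∈ s ∨ ∃ r2 ∈ l, r2 ≠ r ∧ m ∈ rtm.getD r2 [] := by
  intro l
  induction l with
  | nil => intro s; simp
  | cons x l ih =>
    intro s
    rw [List.foldl_cons]
    by_cases hx : x = r
    · rw [if_neg (by simp [hx]), ih]
      subst hx
      constructor
      · rintro (h | ⟨r2, h1, h2, h3⟩)
        · exact Or.inl h
        · exact Or.inr ⟨r2, List.mem_cons_of_mem _ h1, h2, h3⟩
      · rintro (h | ⟨r2, h1, h2, h3⟩)
        · exact Or.inl h
        · rcases List.mem_cons.mp h1 with rfl | h1'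
          · exact absurd rfl h2
          · exact Or.inr ⟨r2, h1', h2, h3⟩
    · rw [if_pos hx, ih, PySem.Set.mem_update]
      constructor
      · rintro ((h | h) | ⟨r2, h1, h2, h3⟩)
        · exact Or.inl h
        · exact Or.inr ⟨x, List.mem_cons_self, hx, h⟩
        · exact Or.inr ⟨r2, List.mem_cons_of_mem _ h1, h2, h3⟩
      · rintro (h | ⟨r2, h1, h2, h3⟩)
        · exact Or.inl (Or.inl h)
        · rcases List.mem_cons.mp h1 with rfl | h1'
          · exact Or.inl (Or.inr h3)
          · exact Or.inr ⟨r2, h1', h2, h3⟩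

-- A's occupancy is > 1 at one of route p's own minutes iff some OTHER route of the same
-- bay is active at that minute (uses that p's minutes are distinct and keys are unique).
lemma conflict_iff (rtm : PySem.Dict String (List Int)) (its : List (String × String))
    (hnd : (its.map Prod.fst).Nodup) (p : String × String) (hp : p ∈ its) (m : Int)
    (hm : m ∈ rtm.getD p.1 []) (hnodup : (rtm.getD p.1 []).Nodup) :
    (1 < (its.flatMap (fun q => (rtm.getD q.1 []).map (fun minute => (q.2, minute)))).count (p.2, m))
      ↔ ∃ q ∈ its, q.1 ≠ p.1 ∧ q.2 = p.2 ∧ m ∈ rtm.getD q.1 [] := by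
  rw [count_stream]
  rcases List.mem_iff_append.mp hp with ⟨l1, l2, rfl⟩
  have hkey : ∀ q ∈ l1 ++ l2, q.1 ≠ p.1 := by
    intro q hq he
    rw [List.map_append, List.map_cons] at hnd
    have hqm : p.1 ∈ l1.map Prod.fst ++ l2.map Prod.fst := by
      rw [← List.map_append, ← he]
      exact List.mem_map_of_mem hq
    rcases List.mem_append.mp hqm with h | h
    · exact (List.nodup_append.mp hnd).2.2 p.1 h p.1 List.mem_cons_self rfl
    · exact (List.nodup_cons.mp (List.nodup_append.mp hnd).2.1).1 h
  rw [List.map_append, List.map_cons, List.sum_append, List.sum_cons, if_pos rfl,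
      List.count_eq_one_of_mem hnodup hm]
  constructor
  · intro h
    have hne : ¬ ((l1.map (fun q => if q.2 = p.2 then (rtm.getD q.1 []).count m else 0)).sum = 0
        ∧ (l2.map (fun q => if q.2 = p.2 then (rtm.getD q.1 []).count m else 0)).sum = 0) := by
      rintro ⟨h1, h2⟩; omega
    have hex : ∃ q ∈ l1 ++ l2, (if q.2 = p.2 then (rtm.getD q.1 []).count m else 0) ≠ 0 := by
      by_contra hall
      push Not at hall
      exact hne ⟨List.sum_eq_zero_iff_forall_eq_nat.mpr (by
          intro x hx; rcases List.mem_map.mp hx with ⟨q, hq, rfl⟩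
          exact hall q (List.mem_append_left _ hq)),
        List.sum_eq_zero_iff_forall_eq_nat.mpr (by
          intro x hx; rcases List.mem_map.mp hx with ⟨q, hq, rfl⟩
          exact hall q (List.mem_append_right _ hq))⟩
    rcases hex with ⟨q, hq, hw⟩
    refine ⟨q, ?_, hkey q hq, ?_, ?_⟩
    · rcases List.mem_append.mp hq with h' | h'
      · exact List.mem_append_left _ h'
      · exact List.mem_append_right _ (List.mem_cons_of_mem _ h')
    · by_contra hb; rw [if_neg hb] at hw; exact hw rfl
    · have hb : q.2 = p.2 := by by_contra hb; rw [if_neg hb] at hw; exact hw rfl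
      rw [if_pos hb] at hw
      exact List.count_pos_iff.mp (Nat.pos_of_ne_zero hw)
  · rintro ⟨q, hq, hne, hb, hmq⟩
    have hq' : q ∈ l1 ++ l2 := by
      rcases List.mem_append.mp hq with h' | h'
      · exact List.mem_append_left _ h'
      · rcases List.mem_cons.mp h' with rfl | h''
        · exact absurd rfl hne
        · exact List.mem_append_right _ h''
    have hw : 1 ≤ (if q.2 = p.2 then (rtm.getD q.1 []).count m else 0) := by
      rw [if_pos hb]; exact List.count_pos_iff.mpr hmq
    have hmem : (if q.2 = p.2 then (rtm.getD q.1 []).count m else 0)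
        ∈ ((l1 ++ l2).map (fun q => if q.2 = p.2 then (rtm.getD q.1 []).count m else 0)) :=
      List.mem_map_of_mem hq'
    have hle := List.le_sum_of_mem hmem
    rw [List.map_append, List.sum_append] at hle
    omega

-- Phase 2, inner loop over one route's minutes: the run of defaultdict(int) increments
-- collapses to a single insert of the conflict count (or nothing when it is zero).
lemma fold_mod (cond : Int → Prop) [DecidablePred cond] (r : String) :
    ∀ (ms : List Int) (d : PySem.Dict String Int),
      ms.foldl (fun rc minute => if cond minute then rc.modify r 0 (· + 1) else rc) d
        = if ms.countP (fun minute => decide (cond minute)) = 0 then d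
          else d.insert r (d.getD r 0 + (ms.countP (fun minute => decide (cond minute)) : Int)) := by
  intro ms
  induction ms with
  | nil => intro d; simp
  | cons m' ms ih =>
    intro d
    rw [List.foldl_cons, List.countP_cons]
    by_cases hc : cond m'
    · rw [if_pos hc, ih, PySem.Dict.modify]
      by_cases h0 : ms.countP (fun minute => decide (cond minute)) = 0
      · simp [h0, hc]
      · rw [if_neg h0, if_neg (by simp [hc])]
        rw [PySem.Dict.insert_insert_self, PySem.Dict.getD_insert_self]
        congr 1
        simp [hc]
        try push_cast
        try ring
        try omega
    · rw [if_neg hc, ih]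
      simp [hc]

-- Phase 2: over distinct route keys, none of which is in the accumulator yet, A's
-- increment-per-minute accumulation and B's insert-the-membership-count-if-positive
-- loop build the same dict, provided the two per-minute conditions agree on the
-- route's own minutes.
lemma phase2 (condA : String × String → Int → Prop) (cB : String × String → Int → Bool)
    [∀ p m, Decidable (condA p m)] (ms : String → List Int) :
    ∀ (its : List (String × String)) (d : PySem.Dict String Int),
      (its.map Prod.fst).Nodup → (∀ p ∈ its, d.contains p.1 = false) →
      (∀ p ∈ its, ∀ m ∈ ms p.1, condA p m ↔ cB p m = true) →
      its.foldl (fun rc p =>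
          (ms p.1).foldl (fun rc minute => if condA p minute then rc.modify p.1 0 (· + 1) else rc) rc) d
        = its.foldl (fun out p =>
            if (((ms p.1).countP (cB p) : Nat) : Int) ≠ 0
            then out.insert p.1 (((ms p.1).countP (cB p) : Nat) : Int)
            else out) d := by
  intro its
  induction its with
  | nil => intro d _ _ _; rfl
  | cons p its ih =>
    intro d hnd hfresh h
    rw [List.foldl_cons, List.foldl_cons, fold_mod]
    have hcnt : (ms p.1).countP (fun minute => decide (condA p minute))
        = (ms p.1).countP (cB p) := by
      refine List.countP_congr ?_
      intro m hm
      have hiff := h p List.mem_cons_self m hm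
      by_cases hc : condA p m
      · simp [hc, hiff.mp hc]
      · cases hcb : cB p m
        · simp [hc]
        · exact absurd (hiff.mpr hcb) hc
    have hdg : d.getD p.1 0 = 0 :=
      PySem.Dict.getD_of_not_contains d 0 (hfresh p List.mem_cons_self)
    have hstep : (if (ms p.1).countP (fun minute => decide (condA p minute)) = 0 then d
          else d.insert p.1 (d.getD p.1 0 + ((ms p.1).countP (fun minute => decide (condA p minute)) : Int)))
        = (if (((ms p.1).countP (cB p) : Nat) : Int) ≠ 0
            then d.insert p.1 (((ms p.1).countP (cB p) : Nat) : Int)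
            else d) := by
      rw [hcnt, hdg]
      by_cases h0 : (ms p.1).countP (cB p) = 0
      · simp [h0]
      · rw [if_neg h0, if_pos (by exact_mod_cast h0), zero_add]
    rw [hstep]
    set d' := (if (((ms p.1).countP (cB p) : Nat) : Int) ≠ 0
            then d.insert p.1 (((ms p.1).countP (cB p) : Nat) : Int)
            else d) with hd'
    apply ih
    · exact (List.nodup_cons.mp hnd).2
    · intro q hq
      have hqne : q.1 ≠ p.1 := by
        intro he
        exact (List.nodup_cons.mp hnd).1 (he ▸ List.mem_map_of_mem hq)
      have hqd : d.contains q.1 = false := hfresh q (List.mem_cons_of_mem _ hq)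
      rw [hd']
      split
      · rw [PySem.Dict.contains_insert, hqd]
        simp [hqne]
      · exact hqd
    · intro q hq m hm
      exact h q (List.mem_cons_of_mem _ hq) m hm

-- The conflict condition: on route p's own minutes, A's nested overlap list is longer
-- than 1 iff the minute lies in B's union of the other same-bay routes' minute sets.
lemma hcond_main (route_to_minutes : List (String × List Int)) (assignments : List (String × String))
    (hpre2 : ∀ q ∈ route_to_minutes, q.2.Nodup)
    (p : String × String) (hp : p ∈ (PySem.Dict.ofList assignments).items) (m : Int)
    (hm : m ∈ (PySem.Dict.ofList route_to_minutes).getD p.1 []) :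
    (1 < (((((PySem.Dict.ofList assignments).items).foldl (fun d p =>
        ((PySem.Dict.ofList route_to_minutes).getD p.1 []).foldl (fun d minute =>
          d.modify p.2 PySem.Dict.empty (fun inner => inner.modify minute [] (· ++ [p.1]))) d)
        PySem.Dict.empty).getD p.2 PySem.Dict.empty).getD m []).length)
      ↔ PySem.Set.contains
          (((((PySem.Dict.ofList assignments).items).foldl (fun d p => d.modify p.2 [] (· ++ [p.1])) PySem.Dict.empty).getD p.2 []).foldl
            (fun s other => if other ≠ p.1 then PySem.Set.update s ((PySem.Dict.ofList route_to_minutes).getD other []) else s)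
            PySem.Set.empty) m = true := by
  have hnodup : ((PySem.Dict.ofList route_to_minutes).getD p.1 []).Nodup := by
    rcases hget : (PySem.Dict.ofList route_to_minutes).get? p.1 with _ | v
    · rw [PySem.Dict.getD_eq_get?_getD, hget]
      exact List.nodup_nil
    · rw [PySem.Dict.getD_eq_get?_getD, hget, Option.getD_some]
      have hv : (p.1, v) ∈ (PySem.Dict.ofList route_to_minutes).items := by
        exact PySem.Dict.mem_items_of_get?_eq_some _ hget
      exact hpre2 (p.1, v) (mem_items_ofList _ _ hv)
  have hlen := phase1 (PySem.Dict.ofList route_to_minutes) p.2 m ((PySem.Dict.ofList assignments).items) PySem.Dict.empty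
  simp only [PySem.Dict.getD_empty, List.length_nil, Nat.zero_add] at hlen
  rw [hlen, conflict_iff _ _ (PySem.Dict.nodup_keys_ofList assignments) p hp m hm hnodup,
      PySem.Set.contains_iff, mem_others, group_getD]
  constructor
  · rintro ⟨q, hq, h1, h2, h3⟩
    refine Or.inr ⟨q.1, List.mem_map_of_mem (List.mem_filter.mpr ⟨hq, by simp [h2]⟩), h1, h3⟩
  · rintro (h | ⟨r2, hr2, h1, h2⟩)
    · simp [PySem.Set.empty] at h
    · rcases List.mem_map.mp hr2 with ⟨q, hq, rfl⟩
      rcases List.mem_filter.mp hq with ⟨hq', hb⟩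
      exact ⟨q, hq', h1, by simpa using hb, h2⟩

-- The two ports, with the input dicts and the two grouping structures abstracted out.
lemma main2 (rtmD : PySem.Dict String (List Int)) (its : List (String × String))
    (bayd : PySem.Dict String (PySem.Dict Int (List String)))
    (bayr : PySem.Dict String (List String))
    (hnd : (its.map Prod.fst).Nodup)
    (hcond : ∀ p ∈ its, ∀ m ∈ rtmD.getD p.1 [],
      (1 < ((bayd.getD p.2 PySem.Dict.empty).getD m []).length) ↔
        PySem.Set.contains ((bayr.getD p.2 []).foldl
          (fun s other => if other ≠ p.1 then PySem.Set.update s (rtmD.getD other []) else s)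
          PySem.Set.empty) m = true) :
    (its.foldl (fun rc p =>
        (rtmD.getD p.1 []).foldl (fun rc minute =>
          if 1 < ((bayd.getD p.2 PySem.Dict.empty).getD minute []).length
          then rc.modify p.1 0 (· + 1) else rc) rc)
      PySem.Dict.empty).items
    = (its.foldl (fun out p =>
        let others : PySem.Set Int :=
          (bayr.getD p.2 []).foldl
            (fun s other => if other ≠ p.1 then PySem.Set.update s (rtmD.getD other []) else s)
            PySem.Set.empty
        let n : Int := ((rtmD.getD p.1 []).countP (fun m => PySem.Set.contains others m) : Nat)
        if n ≠ 0 then out.insert p.1 n else out)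
      PySem.Dict.empty).items :=
  congrArg PySem.Dict.items
    (phase2 _ _ (fun r => rtmD.getD r []) its PySem.Dict.empty hnd (by simp) hcond)

-- ===== VERDICT (by name: the statement is the Claim_ definition above) =====
set_option maxHeartbeats 1000000 in
theorem evaluate_conflicts_per_route_spec : Claim_equal_evaluate_conflicts_per_route := by
  intro route_to_minutes assignments _ hpre
  unfold Spec_evaluate_conflicts_per_route
  unfold evaluate_conflicts_per_route evaluate_conflicts_per_route_alt
  dsimp only
  refine main2 (PySem.Dict.ofList route_to_minutes) ((PySem.Dict.ofList assignments).items) _ _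
    (PySem.Dict.nodup_keys_ofList assignments) ?_
  intro p hp m hm
  exact hcond_main route_to_minutes assignments hpre.2 p hp m hm
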